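-- pv_equiv track=rewrite | github.com/matslindh/codingchallenges | knowit2021/day12.py | count_categories_to_keep
-- ===== SOURCE A (Python) =====
-- from typing import List
--
-- def count_categories_to_keep(lines: List[str]):
--     kept = []
--
--     def recurse(idx, level):
--         has_gifts = False
--
--         while idx < len(lines):
--             if not lines[idx].startswith('-' * level):
--                 return has_gifts, idx
--
--             current = lines[idx]
--             line = current.lstrip('-')
--
--             if line.startswith('G'):
--                 has_gifts = True
--                 idx += 1
--             elif line.startswith('K'):
--                 category_has_gifts, idx = recurse(idx + 1, level + 1)
--
--                 if category_has_gifts: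
--                     kept.append(current)
--
--                 if not has_gifts:
--                     has_gifts = category_has_gifts
--             else:
--                 idx += 1
--
--         return has_gifts, idx
--
--     recurse(0, 0)
--     return len(kept)
-- ===== SOURCE B (Python) =====
-- from typing import List
--
-- def count_categories_to_keep(lines: List[str]):
--     # One explicit-stack pass: frames are [threshold_level, has_gifts]; root frame level 0.
--     stack = [[0, False]]
--     count = 0
--     for line in lines:
--         stripped = line.lstrip('-')
--         d = len(line) - len(stripped)
--         while d < stack[-1][0]:
--             _, hg = stack.pop()
--             if hg:
--                 count += 1
--             stack[-1][1] = stack[-1][1] or hg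
--         if stripped.startswith('G'):
--             stack[-1][1] = True
--         elif stripped.startswith('K'):
--             stack.append([stack[-1][0] + 1, False])
--     while len(stack) > 1:
--         _, hg = stack.pop()
--         if hg:
--             count += 1
--         stack[-1][1] = stack[-1][1] or hg
--     return count
-- ===== Notes on version B (the rewrite author's own statement) =====
-- stated objective: alternative
-- what changed: The nested recursion with a mutable kept-list is replaced by a single left-to-right pass keeping an explicit stack of open (threshold_level, has_gifts) frames, counting a frame when it is popped and OR-ing its gift flag into its parent.
import Mathlib
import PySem

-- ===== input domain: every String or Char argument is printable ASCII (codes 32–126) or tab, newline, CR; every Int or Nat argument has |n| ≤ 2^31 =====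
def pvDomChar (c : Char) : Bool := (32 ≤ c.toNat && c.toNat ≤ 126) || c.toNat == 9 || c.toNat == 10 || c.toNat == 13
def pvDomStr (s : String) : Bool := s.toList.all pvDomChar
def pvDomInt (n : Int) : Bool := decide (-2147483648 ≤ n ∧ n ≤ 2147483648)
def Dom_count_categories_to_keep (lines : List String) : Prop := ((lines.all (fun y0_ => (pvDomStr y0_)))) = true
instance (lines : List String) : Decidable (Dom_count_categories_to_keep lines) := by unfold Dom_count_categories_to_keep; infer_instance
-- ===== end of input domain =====

-- B replaces A's nested recursion + mutable kept-list by a single iterative pass over the lines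
-- with an explicit stack of open (threshold_level, has_gifts) frames: an iterative rewrite of the same-cost computation.

-- shared primitive port: Python's line.lstrip('-') (strip the single char '-' from the left)
def lstripDash (s : String) : String := String.ofList (s.toList.dropWhile (· == '-'))

-- ===== PORT A =====
-- A's inner 'recurse(idx, level)': fueled recursion on the remaining suffix of lines
-- (idx only moves forward, so the suffix represents idx); fuel 2*len+1 is proved sufficient below.
def recurseA : Nat → List String → Nat → Bool → List String → (Bool × List String × List String)
  | 0, rest, _, hg, kept => (hg, rest, kept)
  | _ + 1, [], _, hg, kept => (hg, [], kept)
  | f + 1, cur :: more, level, hg, kept =>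
    if ¬ PySem.Str.startswith cur (String.ofList (List.replicate level '-')) then
      (hg, cur :: more, kept)
    else
      let line := lstripDash cur
      if PySem.Str.startswith line "G" then
        recurseA f more level true kept
      else if PySem.Str.startswith line "K" then
        let res := recurseA f more (level + 1) false kept
        let kept2 := if res.1 then res.2.2 ++ [cur] else res.2.2
        recurseA f res.2.1 level (hg || res.1) kept2
      else
        recurseA f more level hg kept

def count_categories_to_keep (lines : List String) : Int :=
  ((recurseA (2 * lines.length + 1) lines 0 false []).2.2.length : Int)

-- ===== PORT B =====
-- stack is top-first; orTop ORs a popped frame's flag into the new top (stack[-1][1] = stack[-1][1] or hg)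
def orTop (h : Bool) : List (Nat × Bool) → List (Nat × Bool)
  | [] => []
  | (l2, h2) :: r => (l2, h2 || h) :: r

theorem orTop_length (h : Bool) (s : List (Nat × Bool)) : (orTop h s).length = s.length := by
  cases s with
  | nil => rfl
  | cons a r => cases a; rfl

-- the inner 'while d < stack[-1][0]' pop loop
def popB (d : Int) : List (Nat × Bool) → Nat → (List (Nat × Bool) × Nat)
  | [], c => ([], c)
  | (l, h) :: r, c =>
    if d < (l : Int) then popB d (orTop h r) (c + if h then 1 else 0) else ((l, h) :: r, c)
termination_by st => st.length
decreasing_by simp [orTop_length]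

-- the final 'while len(stack) > 1' unwind
def unwindB : List (Nat × Bool) → Nat → Nat
  | [], c => c
  | [_], c => c
  | (_, h) :: fr :: r, c => unwindB (orTop h (fr :: r)) (c + if h then 1 else 0)
termination_by st _ => st.length
decreasing_by simp [orTop_length]

-- the 'for line in lines' loop
def runB : List String → List (Nat × Bool) → Nat → Nat
  | [], st, c => unwindB st c
  | cur :: more, st, c =>
    let stripped := lstripDash cur
    let d := PySem.Str.len cur - PySem.Str.len stripped
    let p := popB d st c
    if PySem.Str.startswith stripped "G" then
      runB more (orTop true p.1) p.2
    else if PySem.Str.startswith stripped "K" then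
      match p.1 with
      | [] => runB more [] p.2   -- unreachable: the root frame (level 0) is never popped
      | (l, h) :: r => runB more ((l + 1, false) :: (l, h) :: r) p.2
    else
      runB more p.1 p.2

def count_categories_to_keep_alt (lines : List String) : Int :=
  (runB lines [(0, false)] 0 : Int)

-- ===== PRECONDITION & SPEC =====
def Spec_count_categories_to_keep (lines : List String) (out : Int) : Prop := out = count_categories_to_keep_alt lines
instance (lines : List String) (out : Int) : Decidable (Spec_count_categories_to_keep lines out) := by unfold Spec_count_categories_to_keep; infer_instance

-- ===== CLAIM (what is proved, stated in full; the proofs are below) =====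
def Claim_equal_count_categories_to_keep : Prop := ∀ (lines : List String), Dom_count_categories_to_keep lines → Spec_count_categories_to_keep lines (count_categories_to_keep lines)

-- ===== LEMMAS AND PROOFS =====

def dcL (cs : List Char) : Nat := (cs.takeWhile (· == '-')).length
def dc (s : String) : Nat := dcL s.toList

theorem repl_prefix_iff (n : Nat) (cs : List Char) :
    List.replicate n '-' <+: cs ↔ n ≤ dcL cs := by
  induction n generalizing cs with
  | zero => simp
  | succ n ih =>
    cases cs with
    | nil => simp [dcL, List.replicate_succ]
    | cons c cs =>
      by_cases hc : c = '-'
      · subst hc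
        simp [List.replicate_succ, List.cons_prefix_cons, dcL, ih]
      · simp [List.replicate_succ, List.cons_prefix_cons, dcL, hc, Ne.symm hc]

theorem startswith_dashes_iff (s : String) (n : Nat) :
    PySem.Str.startswith s (String.ofList (List.replicate n '-')) = true ↔ n ≤ dc s := by
  rw [PySem.Str.startswith_eq, String.toList_ofList, PySem.Chars.startswith_iff]
  exact repl_prefix_iff n s.toList

theorem d_eq (s : String) :
    PySem.Str.len s - PySem.Str.len (lstripDash s) = (dc s : Int) := by
  have h := congrArg List.length (List.takeWhile_append_dropWhile (p := (· == '-')) (l := s.toList))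
  simp only [List.length_append] at h
  simp only [PySem.Str.len_eq, lstripDash, String.toList_ofList, dc, dcL]
  omega
theorem recurseA_kept (f : Nat) (rest : List String) (level : Nat) (hg : Bool)
    (kept : List String) :
    recurseA f rest level hg kept =
      ((recurseA f rest level hg []).1, (recurseA f rest level hg []).2.1,
        kept ++ (recurseA f rest level hg []).2.2) := by
  induction f generalizing rest level hg kept with
  | zero => simp [recurseA]
  | succ f ih =>
    cases rest with
    | nil => simp [recurseA]
    | cons cur more =>
      simp only [recurseA]
      by_cases h1 : PySem.Str.startswith cur (String.ofList (List.replicate level '-')) = true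
      · rw [if_neg (not_not_intro h1), if_neg (not_not_intro h1)]
        by_cases h2 : PySem.Str.startswith (lstripDash cur) "G" = true
        · rw [if_pos h2, if_pos h2]; exact ih ..
        · rw [if_neg h2, if_neg h2]
          by_cases h3 : PySem.Str.startswith (lstripDash cur) "K" = true
          · rw [if_pos h3, if_pos h3]
            rw [ih more (level + 1) false kept]
            dsimp only
            cases hc : (recurseA f more (level + 1) false []).1 with
            | true =>
              rw [if_pos rfl, if_pos rfl]
              rw [ih (recurseA f more (level + 1) false []).2.1 level (hg || true)
                ((kept ++ (recurseA f more (level + 1) false []).2.2) ++ [cur]),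
                ih (recurseA f more (level + 1) false []).2.1 level (hg || true)
                ((recurseA f more (level + 1) false []).2.2 ++ [cur])]
              simp
            | false =>
              rw [if_neg (by simp), if_neg (by simp)]
              rw [ih (recurseA f more (level + 1) false []).2.1 level (hg || false)
                (kept ++ (recurseA f more (level + 1) false []).2.2),
                ih (recurseA f more (level + 1) false []).2.1 level (hg || false)
                ((recurseA f more (level + 1) false []).2.2)]
              simp
          · rw [if_neg h3, if_neg h3]; exact ih ..
      · rw [if_pos h1, if_pos h1]; simp
theorem recurseA_rest_le (f : Nat) (rest : List String) (level : Nat) (hg : Bool)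
    (kept : List String) :
    (recurseA f rest level hg kept).2.1.length ≤ rest.length := by
  induction f generalizing rest level hg kept with
  | zero => simp [recurseA]
  | succ f ih =>
    cases rest with
    | nil => simp [recurseA]
    | cons cur more =>
      simp only [recurseA]
      by_cases h1 : PySem.Str.startswith cur (String.ofList (List.replicate level '-')) = true
      · rw [if_neg (not_not_intro h1)]
        by_cases h2 : PySem.Str.startswith (lstripDash cur) "G" = true
        · rw [if_pos h2]
          exact le_trans (ih ..) (by simp)
        · rw [if_neg h2]
          by_cases h3 : PySem.Str.startswith (lstripDash cur) "K" = true
          · rw [if_pos h3]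
            exact le_trans (ih ..) (le_trans (ih ..) (by simp))
          · rw [if_neg h3]
            exact le_trans (ih ..) (by simp)
      · rw [if_pos h1]
theorem popB_step (d : Int) (level : Nat) (hg : Bool) (S : List (Nat × Bool)) (c : Nat)
    (h : d < (level : Int)) :
    popB d ((level, hg) :: S) c = popB d (orTop hg S) (c + if hg then 1 else 0) := by
  rw [popB, if_pos h]

theorem popB_noop (d : Int) (level : Nat) (hg : Bool) (S : List (Nat × Bool)) (c : Nat)
    (h : ¬ d < (level : Int)) :
    popB d ((level, hg) :: S) c = ((level, hg) :: S, c) := by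
  rw [popB, if_neg h]

-- how one line is processed
theorem runB_cons (cur : String) (more : List String) (st : List (Nat × Bool)) (c : Nat) :
    runB (cur :: more) st c =
      (if PySem.Str.startswith (lstripDash cur) "G" = true then
        runB more (orTop true (popB (PySem.Str.len cur - PySem.Str.len (lstripDash cur)) st c).1)
          (popB (PySem.Str.len cur - PySem.Str.len (lstripDash cur)) st c).2
      else if PySem.Str.startswith (lstripDash cur) "K" = true then
        match (popB (PySem.Str.len cur - PySem.Str.len (lstripDash cur)) st c).1 with
        | [] => runB more [] (popB (PySem.Str.len cur - PySem.Str.len (lstripDash cur)) st c).2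
        | (l, h) :: r => runB more ((l + 1, false) :: (l, h) :: r)
            (popB (PySem.Str.len cur - PySem.Str.len (lstripDash cur)) st c).2
      else runB more (popB (PySem.Str.len cur - PySem.Str.len (lstripDash cur)) st c).1
        (popB (PySem.Str.len cur - PySem.Str.len (lstripDash cur)) st c).2) := by
  rw [runB]
theorem simB (f : Nat) (rest : List String) (level : Nat) (hg : Bool)
    (S : List (Nat × Bool)) (count : Nat) (hS : S ≠ []) (hf : 2 * rest.length < f) :
    runB rest ((level, hg) :: S) count =
      runB (recurseA f rest level hg []).2.1 (orTop (recurseA f rest level hg []).1 S)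
        (count + (recurseA f rest level hg []).2.2.length +
          (if (recurseA f rest level hg []).1 then 1 else 0)) := by
  induction f generalizing rest level hg S count with
  | zero => omega
  | succ f ih =>
    cases rest with
    | nil =>
      obtain ⟨fr, r, rfl⟩ : ∃ fr r, S = fr :: r := by
        cases S with | nil => exact absurd rfl hS | cons fr r => exact ⟨fr, r, rfl⟩
      cases fr with | mk l2 h2 =>
      simp only [recurseA]
      rw [runB, runB, unwindB]
      dsimp only [recurseA, orTop]
      exact rfl
    | cons cur more =>
      simp only [List.length_cons] at hf
      by_cases h1 : PySem.Str.startswith cur (String.ofList (List.replicate level '-')) = true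
      · have hdn : ¬ (PySem.Str.len cur - PySem.Str.len (lstripDash cur)) < (level : Int) := by
          rw [d_eq]
          have h := (startswith_dashes_iff cur level).mp h1
          simp only [not_lt]
          exact_mod_cast h
        rw [runB_cons, popB_noop _ _ _ _ _ hdn]
        simp only [recurseA]
        rw [if_neg (not_not_intro h1)]
        by_cases h2 : PySem.Str.startswith (lstripDash cur) "G" = true
        · rw [if_pos h2, if_pos h2]
          show runB more ((level, hg || true) :: S) count = _
          rw [Bool.or_true]
          exact ih more level true S count hS (by omega)
        · rw [if_neg h2, if_neg h2]
          by_cases h3 : PySem.Str.startswith (lstripDash cur) "K" = true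
          · rw [if_pos h3, if_pos h3]
            show runB more ((level + 1, false) :: (level, hg) :: S) count = _
            rw [ih more (level + 1) false ((level, hg) :: S) count (by simp) (by omega)]
            show runB _ ((level, hg || (recurseA f more (level + 1) false []).1) :: S) _ = _
            have hr1 : (recurseA f more (level + 1) false []).2.1.length ≤ more.length :=
              recurseA_rest_le ..
            rw [ih _ level _ S _ hS (by omega)]
            rw [recurseA_kept f (recurseA f more (level + 1) false []).2.1 level
              (hg || (recurseA f more (level + 1) false []).1)
              (if (recurseA f more (level + 1) false []).1 = true
                then (recurseA f more (level + 1) false []).2.2 ++ [cur]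
                else (recurseA f more (level + 1) false []).2.2)]
            dsimp only
            cases hc : (recurseA f more (level + 1) false []).1 <;> simp <;> ring_nf
          · rw [if_neg h3, if_neg h3]
            exact ih more level hg S count hS (by omega)
      · have hdy : (PySem.Str.len cur - PySem.Str.len (lstripDash cur)) < (level : Int) := by
          rw [d_eq]
          have h : ¬ level ≤ dc cur := fun h => h1 ((startswith_dashes_iff cur level).mpr h)
          exact_mod_cast Nat.lt_of_not_le h
        simp only [recurseA]
        rw [if_pos h1]
        dsimp only
        rw [runB_cons, runB_cons, popB_step _ _ _ _ _ hdy]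
        simp
theorem rootB (f : Nat) (rest : List String) (hg : Bool) (count : Nat)
    (hf : 2 * rest.length < f) :
    runB rest [(0, hg)] count = count + (recurseA f rest 0 hg []).2.2.length := by
  induction f generalizing rest hg count with
  | zero => omega
  | succ f ih =>
    cases rest with
    | nil =>
      simp only [recurseA]
      rw [runB, unwindB]
      simp
    | cons cur more =>
      simp only [List.length_cons] at hf
      have h1 : PySem.Str.startswith cur (String.ofList (List.replicate 0 '-')) = true :=
        (startswith_dashes_iff cur 0).mpr (Nat.zero_le _)
      have hdn : ¬ (PySem.Str.len cur - PySem.Str.len (lstripDash cur)) < ((0 : Nat) : Int) := by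
        rw [d_eq]
        simp
      rw [runB_cons, popB_noop _ _ _ _ _ hdn]
      simp only [recurseA]
      rw [if_neg (not_not_intro h1)]
      by_cases h2 : PySem.Str.startswith (lstripDash cur) "G" = true
      · rw [if_pos h2, if_pos h2]
        show runB more [(0, hg || true)] count = _
        rw [Bool.or_true]
        exact ih more true count (by omega)
      · rw [if_neg h2, if_neg h2]
        by_cases h3 : PySem.Str.startswith (lstripDash cur) "K" = true
        · rw [if_pos h3, if_pos h3]
          show runB more [(1, false), (0, hg)] count = _
          rw [simB f more 1 false [(0, hg)] count (by simp) (by omega)]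
          show runB _ [(0, hg || (recurseA f more 1 false []).1)] _ = _
          have hr1 : (recurseA f more 1 false []).2.1.length ≤ more.length :=
            recurseA_rest_le ..
          rw [ih (recurseA f more 1 false []).2.1 _ _ (by omega)]
          rw [recurseA_kept f (recurseA f more 1 false []).2.1 0
            (hg || (recurseA f more 1 false []).1)
            (if (recurseA f more 1 false []).1 = true
              then (recurseA f more 1 false []).2.2 ++ [cur]
              else (recurseA f more 1 false []).2.2)]
          dsimp only
          cases hc : (recurseA f more 1 false []).1 <;> simp <;> ring_nf
        · rw [if_neg h3, if_neg h3]
          exact ih more hg count (by omega)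

-- ===== VERDICT (by name: the statement is the Claim_ definition above) =====
theorem count_categories_to_keep_spec : Claim_equal_count_categories_to_keep := by
  intro lines _
  unfold Spec_count_categories_to_keep count_categories_to_keep count_categories_to_keep_alt
  rw [rootB (2 * lines.length + 1) lines false 0 (by omega)]
  simp
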